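-- pv_equiv track=rewrite | github.com/jongwoo108/EyeSis | backend/utils/face_angle_detector.py | is_all_angles_collected
-- ===== SOURCE A (Python) =====
-- def is_all_angles_collected(collected_angles: list) -> bool:
--     """
--     모든 필수 각도가 수집되었는지 확인
--
--     Args:
--         collected_angles: 이미 수집된 각도 리스트
--
--     Returns:
--         True면 모든 필수 각도 수집 완료
--     """
--     from collections import defaultdict
--
--     required_angles = {
--         "front": 1,
--         "left": 1,
--         "right": 1,
--         "top": 1
--     }
--
--     angle_counts = defaultdict(int)
--     for angle in collected_angles:
--         angle_counts[angle] += 1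
--
--     for angle, min_count in required_angles.items():
--         if angle_counts[angle] < min_count:
--             return False
--
--     return True
-- ===== SOURCE B (Python) =====
-- def is_all_angles_collected(collected_angles: list) -> bool:
--     """Single pass with a shrinking set of still-missing angles; early exit once empty."""
--     remaining = {"front", "left", "right", "top"}
--     for angle in collected_angles:
--         remaining.discard(angle)
--         if not remaining:
--             return True
--     return False
-- ===== Notes on version B (the rewrite author's own statement) =====
-- stated objective: alternative
-- what changed: Replaced A's build-a-count-dict-then-threshold-loop with a single pass that maintains a shrinking set of still-missing angles and returns True as soon as it becomes empty (early exit); no counting table is built.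
import Mathlib
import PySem

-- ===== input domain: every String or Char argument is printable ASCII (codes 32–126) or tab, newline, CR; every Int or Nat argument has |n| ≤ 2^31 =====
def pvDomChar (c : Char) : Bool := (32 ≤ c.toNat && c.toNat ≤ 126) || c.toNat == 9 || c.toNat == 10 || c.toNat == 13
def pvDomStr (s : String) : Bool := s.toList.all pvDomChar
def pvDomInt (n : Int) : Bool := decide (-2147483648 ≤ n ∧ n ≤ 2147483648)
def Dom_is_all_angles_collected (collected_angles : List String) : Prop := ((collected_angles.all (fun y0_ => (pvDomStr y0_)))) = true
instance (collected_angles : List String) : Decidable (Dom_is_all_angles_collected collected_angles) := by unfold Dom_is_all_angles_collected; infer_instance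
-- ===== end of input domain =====

-- ===== PORT A =====
-- B replaces A's build-a-count-dict-then-threshold-loop with a single pass over the input
-- that shrinks a set of still-missing angles and exits early once it is empty (alternative decomposition).
def is_all_angles_collected (collected_angles : List String) : Bool :=
  let required_angles : PySem.Dict String Int :=
    PySem.Dict.ofList [("front", 1), ("left", 1), ("right", 1), ("top", 1)]
  let angle_counts : PySem.Dict String Int :=
    collected_angles.foldl (fun d angle => d.modify angle 0 (· + 1)) PySem.Dict.empty
  -- early-return loop over required_angles.items() rendered as List.all
  required_angles.items.all (fun p => !(angle_counts.getD p.1 0 < p.2))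

-- ===== PORT B =====
-- the 'for angle in collected_angles' loop with early return, state = the shrinking set 'remaining'
def pvAltLoop (remaining : PySem.Set String) (xs : List String) : Bool :=
  match xs with
  | [] => false
  | angle :: rest =>
      let r := PySem.Set.discard remaining angle
      if r.isEmpty then true else pvAltLoop r rest

def is_all_angles_collected_alt (collected_angles : List String) : Bool :=
  pvAltLoop (PySem.Set.ofList ["front", "left", "right", "top"]) collected_angles

-- ===== PRECONDITION & SPEC =====
def Spec_is_all_angles_collected (collected_angles : List String) (out : Bool) : Prop := out = is_all_angles_collected_alt collected_angles
instance (collected_angles : List String) (out : Bool) : Decidable (Spec_is_all_angles_collected collected_angles out) := by unfold Spec_is_all_angles_collected; infer_instance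

-- ===== CLAIM =====
def Claim_equal_is_all_angles_collected : Prop := ∀ (collected_angles : List String), Dom_is_all_angles_collected collected_angles → Spec_is_all_angles_collected collected_angles (is_all_angles_collected collected_angles)

-- ===== LEMMAS AND PROOFS =====

theorem pvAltLoop_true_iff (xs : List String) (r : List String) (hr : r ≠ []) :
    pvAltLoop r xs = true ↔ ∀ s ∈ r, s ∈ xs := by
  induction xs generalizing r with
  | nil =>
      simp [pvAltLoop]
      obtain ⟨a, r', rfl⟩ := List.exists_cons_of_ne_nil hr
      exact ⟨a, .head _⟩
  | cons a rest ih =>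
      simp only [pvAltLoop]
      by_cases h : (PySem.Set.discard r a).isEmpty
      · simp only [h, if_true, true_iff]
        intro s hs
        by_cases hsa : s = a
        · exact hsa ▸ List.mem_cons_self
        · exfalso
          have : s ∈ PySem.Set.discard r a := (PySem.Set.mem_discard _ _ _).mpr ⟨hs, hsa⟩
          rw [List.isEmpty_iff.mp h] at this
          exact absurd this (List.not_mem_nil)
      · have hne : PySem.Set.discard r a ≠ [] := fun he => h (by simp [he])
        simp only [h, Bool.false_eq_true, if_false]
        rw [ih _ hne]
        constructor
        · intro hall s hs
          by_cases hsa : s = a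
          · exact hsa ▸ List.mem_cons_self
          · exact List.mem_cons_of_mem _ (hall s ((PySem.Set.mem_discard _ _ _).mpr ⟨hs, hsa⟩))
        · intro hall s hs
          obtain ⟨hsr, hsa⟩ := (PySem.Set.mem_discard _ _ _).mp hs
          rcases List.mem_cons.mp (hall s hsr) with h1 | h2
          · exact absurd rfl (h1 ▸ hsa)
          · exact h2

theorem alt_eq_contains (xs : List String) :
    is_all_angles_collected_alt xs
      = (["front", "left", "right", "top"].all (fun s => xs.contains s)) := by
  have hof : PySem.Set.ofList ["front", "left", "right", "top"]
      = ["front", "left", "right", "top"] := by decide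
  unfold is_all_angles_collected_alt
  rw [hof, Bool.eq_iff_iff, pvAltLoop_true_iff xs _ (by simp)]
  simp

-- ===== VERDICT =====
theorem is_all_angles_collected_spec : Claim_equal_is_all_angles_collected := by
  intro xs _
  unfold Spec_is_all_angles_collected is_all_angles_collected
  rw [alt_eq_contains]
  simp only [← PySem.Dict.counter_eq_foldl]
  have hi : (PySem.Dict.ofList [("front", (1:Int)), ("left", 1), ("right", 1), ("top", 1)]).items
      = [("front", 1), ("left", 1), ("right", 1), ("top", 1)] := by rfl
  simp [hi, PySem.Dict.getD_counter, List.count_eq_zero]
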